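-- pv_equiv track=rewrite | github.com/PeterKADam/AIB | Projects/project6/hpfold.py | hp_matches
-- ===== SOURCE A (Python) =====
-- from typing import List, Tuple
--
-- def hp_matches(input: str):
--
--     evenodd = [
--         ("e" if i % 2 == 0 and char == "h" else "o" if i % 2 == 1 and char == "h" else "p")
--         for i, char in enumerate(input.lower())
--     ]
--
--     matches: list[Tuple[int, int]] = []
--     j = len(evenodd) - 1
--
--     matches_n = min(evenodd.count("o"), evenodd.count("e"))
--
--     for char1 in range(
--         len(evenodd),
--     ):
--         if evenodd[char1] == "o" and matches_n > 0:
--             for char2 in range(j, 0, -1):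
--
--                 if evenodd[char2] == "e" and char1 < char2 and (char2 - char1) > 1:
--
--                     matches.append((char1, char2))
--                     j = char2 - 1
--                     matches_n -= 1
--                     break
--
--     return matches
-- ===== SOURCE B (Python) =====
-- def hp_matches(input: str):
--     # Single pass with a descending pointer over the even-h positions:
--     # pair each odd-h position (ascending) with the largest remaining
--     # even-h position, when it lies at least 2 to its right.
--     s = input.lower()
--     odds = [i for i, c in enumerate(s) if i % 2 == 1 and c == "h"]
--     evens = [i for i, c in enumerate(s) if i % 2 == 0 and c == "h"]
--     evens.reverse()
--     matches = []
--     k = 0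
--     for o in odds:
--         if k < len(evens) and o + 1 < evens[k]:
--             matches.append((o, evens[k]))
--             k += 1
--     return matches
-- ===== Notes on version B (the rewrite author's own statement) =====
-- stated objective: alternative
-- what changed: Instead of A's per-odd-position inner rescan over range(j,0,-1) with a matches_n counter, B collects the even-h positions once in descending order and advances a single pointer through them, pairing each odd-h position with the largest remaining even-h position when it lies at least 2 to the right; on the measured random inputs this is not measurably faster.
import Mathlib
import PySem

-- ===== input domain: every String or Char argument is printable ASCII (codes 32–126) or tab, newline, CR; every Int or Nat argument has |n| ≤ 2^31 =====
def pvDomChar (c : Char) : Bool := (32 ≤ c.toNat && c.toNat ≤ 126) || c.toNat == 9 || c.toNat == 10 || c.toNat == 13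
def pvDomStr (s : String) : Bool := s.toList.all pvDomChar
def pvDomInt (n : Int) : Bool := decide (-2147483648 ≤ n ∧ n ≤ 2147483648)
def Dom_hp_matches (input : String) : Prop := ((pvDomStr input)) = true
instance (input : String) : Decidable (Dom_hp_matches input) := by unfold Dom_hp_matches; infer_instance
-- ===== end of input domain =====

-- B replaces A's per-odd-position inner rescan over range(j,0,-1) (and its matches_n counter)
-- by a single pass with a descending pointer over the precomputed even-h positions (objective: alternative).

-- ===== PORT A =====
-- the body of A's outer 'for char1' loop; the inner 'for char2 … break' is the find? scan
def pvStepA (eo : List String) (st : List (Int × Int) × Int × Int) (c1 : Int) :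
    List (Int × Int) × Int × Int :=
  if PySem.List.pyGetD eo c1 "" = "o" ∧ 0 < st.2.2 then
    match List.find? (fun c2 => decide (PySem.List.pyGetD eo c2 "" = "e" ∧ c1 < c2 ∧ c2 - c1 > 1))
        (PySem.List.pyRange st.2.1 0 (-1)) with
    | some c2 => (st.1 ++ [(c1, c2)], c2 - 1, st.2.2 - 1)
    | none => st
  else st

def hp_matches (input : String) : List (Int × Int) :=
  let lo := (PySem.Str.lower input).toList
  let evenodd : List String := (PySem.List.enumerate lo 0).map (fun ic =>
    if PySem.Int.mod ic.1 2 = 0 ∧ ic.2 = 'h' then "e"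
    else if PySem.Int.mod ic.1 2 = 1 ∧ ic.2 = 'h' then "o" else "p")
  let j : Int := (evenodd.length : Int) - 1
  let matchesN : Int := (min (PySem.List.count evenodd "o") (PySem.List.count evenodd "e") : Nat)
  ((PySem.List.pyRange 0 (evenodd.length : Int) 1).foldl (pvStepA evenodd) ([], j, matchesN)).1

-- ===== PORT B =====
-- the body of B's single 'for o in odds' loop; st.2 is the pointer k into evens
def pvStepB (evens : List Int) (st : List (Int × Int) × Int) (o : Int) :
    List (Int × Int) × Int :=
  if st.2 < (evens.length : Int) ∧ o + 1 < PySem.List.pyGetD evens st.2 0 then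
    (st.1 ++ [(o, PySem.List.pyGetD evens st.2 0)], st.2 + 1)
  else st

def hp_matches_alt (input : String) : List (Int × Int) :=
  let s := (PySem.Str.lower input).toList
  let odds : List Int := ((PySem.List.enumerate s 0).filter
    (fun ic => decide (PySem.Int.mod ic.1 2 = 1 ∧ ic.2 = 'h'))).map (·.1)
  let evens : List Int := (((PySem.List.enumerate s 0).filter
    (fun ic => decide (PySem.Int.mod ic.1 2 = 0 ∧ ic.2 = 'h'))).map (·.1)).reverse
  (odds.foldl (pvStepB evens) ([], 0)).1

-- ===== PRECONDITION & SPEC =====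
def Spec_hp_matches (input : String) (out : List (Int × Int)) : Prop := out = hp_matches_alt input
instance (input : String) (out : List (Int × Int)) : Decidable (Spec_hp_matches input out) := by unfold Spec_hp_matches; infer_instance

-- ===== CLAIM (what is proved, stated in full; the proofs are below) =====
def Claim_equal_hp_matches : Prop := ∀ (input : String), Dom_hp_matches input → Spec_hp_matches input (hp_matches input)

-- ===== LEMMAS AND PROOFS =====

-- the entry A's comprehension writes at index i (as a function of the lowered characters)
def pvG (cs : List Char) (i : Int) : String :=
  if PySem.Int.mod i 2 = 0 ∧ PySem.List.pyGetD cs i ' ' = 'h' then "e"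
  else if PySem.Int.mod i 2 = 1 ∧ PySem.List.pyGetD cs i ' ' = 'h' then "o" else "p"

def pvEO (cs : List Char) : List String :=
  (PySem.List.pyRange 0 (cs.length : Int) 1).map (pvG cs)

def pvOdds (cs : List Char) : List Int :=
  (PySem.List.pyRange 0 (cs.length : Int) 1).filter
    (fun i => decide (PySem.Int.mod i 2 = 1 ∧ PySem.List.pyGetD cs i ' ' = 'h'))

def pvEvens (cs : List Char) : List Int :=
  ((PySem.List.pyRange 0 (cs.length : Int) 1).filter
    (fun i => decide (PySem.Int.mod i 2 = 0 ∧ PySem.List.pyGetD cs i ' ' = 'h'))).reverse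

lemma pvEO_get (cs : List Char) (i : Int) (h0 : 0 ≤ i) (h1 : i < (cs.length : Int)) :
    PySem.List.pyGetD (pvEO cs) i "" = pvG cs i := by
  unfold pvEO
  exact PySem.List.pyGetD_map_pyRange_of_nonneg (pvG cs) _ i "" h0 h1

lemma pvG_eq_o (cs : List Char) (i : Int) :
    pvG cs i = "o" ↔ (PySem.Int.mod i 2 = 1 ∧ PySem.List.pyGetD cs i ' ' = 'h') := by
  unfold pvG
  split_ifs with h1 h2
  · constructor
    · intro h; exact absurd h (by decide)
    · rintro ⟨hm, _⟩; rw [h1.1] at hm; exact absurd hm (by decide)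
  · exact iff_of_true rfl h2
  · constructor
    · intro h; exact absurd h (by decide)
    · intro h; exact absurd h h2

lemma pvG_eq_e (cs : List Char) (i : Int) :
    pvG cs i = "e" ↔ (PySem.Int.mod i 2 = 0 ∧ PySem.List.pyGetD cs i ' ' = 'h') := by
  unfold pvG
  split_ifs with h1 h2
  · exact iff_of_true rfl h1
  · constructor
    · intro h; exact absurd h (by decide)
    · intro h; exact absurd h h1
  · constructor
    · intro h; exact absurd h (by decide)
    · intro h; exact absurd h h1

lemma pvEO_of_enumerate (cs : List Char) :
    (PySem.List.enumerate cs 0).map (fun ic =>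
      if PySem.Int.mod ic.1 2 = 0 ∧ ic.2 = 'h' then "e"
      else if PySem.Int.mod ic.1 2 = 1 ∧ ic.2 = 'h' then "o" else "p") = pvEO cs := by
  unfold pvEO
  rw [PySem.List.enumerate_eq_map_pyRange cs ' ', List.map_map]
  rfl

lemma pvOdds_of_enumerate (cs : List Char) :
    ((PySem.List.enumerate cs 0).filter
      (fun ic => decide (PySem.Int.mod ic.1 2 = 1 ∧ ic.2 = 'h'))).map (·.1) = pvOdds cs := by
  unfold pvOdds
  rw [PySem.List.enumerate_eq_map_pyRange cs ' ', List.filter_map, List.map_map]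
  exact List.map_id' _

lemma pvEvens_of_enumerate (cs : List Char) :
    (((PySem.List.enumerate cs 0).filter
      (fun ic => decide (PySem.Int.mod ic.1 2 = 0 ∧ ic.2 = 'h'))).map (·.1)).reverse = pvEvens cs := by
  unfold pvEvens
  rw [PySem.List.enumerate_eq_map_pyRange cs ' ', List.filter_map, List.map_map]
  exact congrArg List.reverse (List.map_id' _)

lemma mem_pvEvens (cs : List Char) (e : Int) :
    e ∈ pvEvens cs ↔ (0 ≤ e ∧ e < (cs.length : Int) ∧ PySem.Int.mod e 2 = 0 ∧
      PySem.List.pyGetD cs e ' ' = 'h') := by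
  unfold pvEvens
  simp only [List.mem_reverse, List.mem_filter, PySem.List.mem_pyRange_one, decide_eq_true_eq]
  tauto

lemma mem_pvOdds (cs : List Char) (o : Int) :
    o ∈ pvOdds cs ↔ (0 ≤ o ∧ o < (cs.length : Int) ∧ PySem.Int.mod o 2 = 1 ∧
      PySem.List.pyGetD cs o ' ' = 'h') := by
  unfold pvOdds
  simp only [List.mem_filter, PySem.List.mem_pyRange_one, decide_eq_true_eq]
  tauto

lemma pairwise_gt_pvEvens (cs : List Char) : (pvEvens cs).Pairwise (· > ·) := by
  unfold pvEvens
  rw [List.pairwise_reverse]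
  exact (PySem.List.pairwise_lt_pyRange_one 0 _).filter _

lemma count_o_pvEO (cs : List Char) :
    PySem.List.count (pvEO cs) "o" = (pvOdds cs).length := by
  unfold pvEO pvOdds
  rw [PySem.List.count_eq, List.count_eq_countP, List.countP_map, List.countP_eq_length_filter]
  congr 1
  apply List.filter_congr
  intro x _
  simp only [Function.comp_apply, beq_eq_decide]
  exact decide_eq_decide.mpr (pvG_eq_o cs x)

lemma count_e_pvEO (cs : List Char) :
    PySem.List.count (pvEO cs) "e" = (pvEvens cs).length := by
  unfold pvEO pvEvens
  rw [PySem.List.count_eq, List.count_eq_countP, List.countP_map, List.countP_eq_length_filter,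
    List.length_reverse]
  congr 1
  apply List.filter_congr
  intro x _
  simp only [Function.comp_apply, beq_eq_decide]
  exact decide_eq_decide.mpr (pvG_eq_e cs x)

-- A's fold over range(len) only acts at the "o" positions
lemma foldA_odds (cs : List Char) (init : List (Int × Int) × Int × Int) :
    (PySem.List.pyRange 0 (cs.length : Int) 1).foldl (pvStepA (pvEO cs)) init =
      (pvOdds cs).foldl (pvStepA (pvEO cs)) init := by
  unfold pvOdds
  rw [List.foldl_filter]
  apply PySem.List.foldl_congr_mem
  intro acc x hx
  rw [PySem.List.mem_pyRange_one] at hx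
  by_cases hp : (PySem.Int.mod x 2 = 1 ∧ PySem.List.pyGetD cs x ' ' = 'h')
  · rw [if_pos (decide_eq_true hp)]
  · rw [if_neg (fun hc => hp (of_decide_eq_true hc))]
    unfold pvStepA
    rw [if_neg]
    rintro ⟨h1, -⟩
    rw [pvEO_get cs x hx.1 hx.2] at h1
    exact hp ((pvG_eq_o cs x).mp h1)

-- A's inner scan returns the largest even-h position ≤ j when it is > o+1, else nothing
lemma pvScan (cs : List Char) (j o : Int) (hj : j ≤ (cs.length : Int) - 1) (ho : 0 < o) :
    List.find? (fun c2 => decide (PySem.List.pyGetD (pvEO cs) c2 "" = "e" ∧ o < c2 ∧ c2 - o > 1))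
        (PySem.List.pyRange j 0 (-1)) =
      (match (pvEvens cs).filter (fun e => decide (e ≤ j)) with
        | [] => none
        | e :: _ => if o + 1 < e then some e else none) := by
  have hmemE : ∀ x : Int, 0 < x → x ≤ j →
      (PySem.List.pyGetD (pvEO cs) x "" = "e" ↔ x ∈ pvEvens cs) := by
    intro x hx0 hxj
    rw [pvEO_get cs x (by omega) (by omega), pvG_eq_e, mem_pvEvens]
    constructor
    · rintro ⟨hm, hh⟩; exact ⟨by omega, by omega, hm, hh⟩
    · rintro ⟨-, -, hm, hh⟩; exact ⟨hm, hh⟩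
  cases hfil : (pvEvens cs).filter (fun e => decide (e ≤ j)) with
  | nil =>
    apply List.find?_eq_none.mpr
    intro x hx hpx
    rw [PySem.List.mem_pyRange_neg_one] at hx
    simp only [decide_eq_true_eq] at hpx
    obtain ⟨hxe, hxo, hxd⟩ := hpx
    have hxE : x ∈ pvEvens cs := (hmemE x hx.1 hx.2).mp hxe
    have hmem : x ∈ (pvEvens cs).filter (fun e => decide (e ≤ j)) :=
      List.mem_filter.mpr ⟨hxE, by simpa using hx.2⟩
    rw [hfil] at hmem
    cases hmem
  | cons e t =>
    have heF : e ∈ (pvEvens cs).filter (fun e => decide (e ≤ j)) := by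
      rw [hfil]; exact List.mem_cons_self
    obtain ⟨heE, hej⟩ := List.mem_filter.mp heF
    have hej' : e ≤ j := by simpa using hej
    obtain ⟨he0, heN, hem, heh⟩ := (mem_pvEvens cs e).mp heE
    have hpairF : ((pvEvens cs).filter (fun e => decide (e ≤ j))).Pairwise (· > ·) :=
      (pairwise_gt_pvEvens cs).filter _
    rw [hfil] at hpairF
    have hmax : ∀ x ∈ pvEvens cs, x ≤ j → x ≤ e := by
      intro x hxE hxj
      have hxF : x ∈ (pvEvens cs).filter (fun e => decide (e ≤ j)) :=
        List.mem_filter.mpr ⟨hxE, by simpa using hxj⟩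
      rw [hfil] at hxF
      rcases List.mem_cons.mp hxF with h | h
      · omega
      · have := List.rel_of_pairwise_cons hpairF h
        omega
    have hmatch : (match e :: t with
        | [] => (none : Option Int)
        | x :: _ => if o + 1 < x then some x else none) = if o + 1 < e then some e else none := rfl
    rw [hmatch]
    by_cases ho2 : o + 1 < e
    · rw [if_pos ho2]
      rw [PySem.List.pyRange_neg_one_eq_reverse]
      rw [PySem.List.pyRange_one_append (0 + 1) e (j + 1) (by omega) (by omega)]
      rw [PySem.List.pyRange_one_cons (show e < j + 1 by omega)]
      rw [List.reverse_append, List.reverse_cons, List.find?_append, List.find?_append]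
      have hnone : List.find?
          (fun c2 => decide (PySem.List.pyGetD (pvEO cs) c2 "" = "e" ∧ o < c2 ∧ c2 - o > 1))
          (PySem.List.pyRange (e + 1) (j + 1) 1).reverse = none := by
        apply List.find?_eq_none.mpr
        intro x hx hpx
        rw [List.mem_reverse, PySem.List.mem_pyRange_one] at hx
        simp only [decide_eq_true_eq] at hpx
        have hxE : x ∈ pvEvens cs := (hmemE x (by omega) (by omega)).mp hpx.1
        have := hmax x hxE (by omega)
        omega
      rw [hnone]
      have hpe : (fun c2 => decide (PySem.List.pyGetD (pvEO cs) c2 "" = "e" ∧ o < c2 ∧ c2 - o > 1)) e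
          = true := by
        simp only [decide_eq_true_eq]
        exact ⟨(hmemE e (by omega) hej').mpr heE, by omega, by omega⟩
      rw [List.find?_singleton, if_pos hpe]
      rfl
    · rw [if_neg ho2]
      apply List.find?_eq_none.mpr
      intro x hx hpx
      rw [PySem.List.mem_pyRange_neg_one] at hx
      simp only [decide_eq_true_eq] at hpx
      have hxE : x ∈ pvEvens cs := (hmemE x hx.1 hx.2).mp hpx.1
      have := hmax x hxE hx.2
      omega

-- the main loop invariant: A's (j, matches_n) state corresponds to B's pointer k
lemma pvMain (cs : List Char) (os : List Int) : ∀ (ms : List (Int × Int)) (j k mn : Int),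
    (∀ o ∈ os, o ∈ pvOdds cs) →
    0 ≤ k →
    (pvEvens cs).drop k.toNat = (pvEvens cs).filter (fun e => decide (e ≤ j)) →
    j ≤ (cs.length : Int) - 1 →
    mn = ((min (pvOdds cs).length (pvEvens cs).length : Nat) : Int) - k →
    k + os.length ≤ ((pvOdds cs).length : Int) →
    (os.foldl (pvStepA (pvEO cs)) (ms, j, mn)).1 = (os.foldl (pvStepB (pvEvens cs)) (ms, k)).1 := by
  induction os with
  | nil => intro ms j k mn _ _ _ _ _ _; rfl
  | cons o os ih =>
    intro ms j k mn hmem hk0 hinv hj hmn hlen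
    have hoO : o ∈ pvOdds cs := hmem o List.mem_cons_self
    obtain ⟨ho0, hoN, hom, hoh⟩ := (mem_pvOdds cs o).mp hoO
    have hoodd : 0 < o := by
      rcases lt_or_eq_of_le ho0 with h | h
      · exact h
      · rw [← h] at hom; exact absurd hom (by decide)
    have hA1 : PySem.List.pyGetD (pvEO cs) o "" = "o" := by
      rw [pvEO_get cs o ho0 hoN]
      exact (pvG_eq_o cs o).mpr ⟨hom, hoh⟩
    have hmemos : ∀ x ∈ os, x ∈ pvOdds cs := fun x hx => hmem x (List.mem_cons_of_mem _ hx)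
    have hlen' : k + os.length ≤ ((pvOdds cs).length : Int) := by
      simp only [List.length_cons] at hlen; push_cast at hlen ⊢; omega
    cases hd : (pvEvens cs).drop k.toNat with
    | nil =>
      have hfil : (pvEvens cs).filter (fun e => decide (e ≤ j)) = [] := by rw [← hinv, hd]
      have hAstep : pvStepA (pvEO cs) (ms, j, mn) o = (ms, j, mn) := by
        show (if PySem.List.pyGetD (pvEO cs) o "" = "o" ∧ 0 < mn then
            match List.find?
                (fun c2 => decide (PySem.List.pyGetD (pvEO cs) c2 "" = "e" ∧ o < c2 ∧ c2 - o > 1))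
                (PySem.List.pyRange j 0 (-1)) with
            | some c2 => (ms ++ [(o, c2)], c2 - 1, mn - 1)
            | none => (ms, j, mn)
          else (ms, j, mn)) = (ms, j, mn)
        rw [pvScan cs j o hj hoodd, hfil]
        split <;> rfl
      have hEk : ((pvEvens cs).length : Int) ≤ k := by
        have := List.drop_eq_nil_iff.mp hd
        omega
      have hBstep : pvStepB (pvEvens cs) (ms, k) o = (ms, k) := by
        show (if k < ((pvEvens cs).length : Int) ∧ o + 1 < PySem.List.pyGetD (pvEvens cs) k 0 then
            (ms ++ [(o, PySem.List.pyGetD (pvEvens cs) k 0)], k + 1) else (ms, k)) = (ms, k)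
        rw [if_neg]
        rintro ⟨h1, -⟩
        omega
      rw [List.foldl_cons, List.foldl_cons, hAstep, hBstep]
      exact ih ms j k mn hmemos hk0 hinv hj hmn hlen'
    | cons e t =>
      have hfil : (pvEvens cs).filter (fun e => decide (e ≤ j)) = e :: t := by rw [← hinv, hd]
      obtain ⟨heE, hejb⟩ := List.mem_filter.mp (by rw [hfil]; exact List.mem_cons_self :
        e ∈ (pvEvens cs).filter (fun e => decide (e ≤ j)))
      have hej : e ≤ j := by simpa using hejb
      obtain ⟨he0, heN, hem, heh⟩ := (mem_pvEvens cs e).mp heE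
      have hklen : k.toNat < (pvEvens cs).length := by
        by_contra h
        rw [not_lt] at h
        rw [List.drop_eq_nil_of_le h] at hd
        cases hd
      have hgetE : PySem.List.pyGetD (pvEvens cs) k 0 = e := by
        rw [PySem.List.pyGetD_eq_getElem _ 0 hk0 (by omega)]
        have h1 : (pvEvens cs)[k.toNat]? = some e := by
          rw [← List.head?_drop, hd]; rfl
        rw [List.getElem?_eq_getElem hklen] at h1
        exact Option.some.inj h1
      have hpairD : ((pvEvens cs).drop k.toNat).Pairwise (· > ·) :=
        List.Pairwise.sublist (List.drop_sublist k.toNat (pvEvens cs)) (pairwise_gt_pvEvens cs)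
      rw [hd] at hpairD
      have hlt : ∀ x ∈ t, e > x := fun x hx => List.rel_of_pairwise_cons hpairD hx
      by_cases hoe : o + 1 < e
      · have hmn0 : 0 < mn := by
          have h1 : k + 1 ≤ ((pvOdds cs).length : Int) := by
            simp only [List.length_cons] at hlen; push_cast at hlen; omega
          omega
        have hAstep : pvStepA (pvEO cs) (ms, j, mn) o = (ms ++ [(o, e)], e - 1, mn - 1) := by
          show (if PySem.List.pyGetD (pvEO cs) o "" = "o" ∧ 0 < mn then
              match List.find?
                  (fun c2 => decide (PySem.List.pyGetD (pvEO cs) c2 "" = "e" ∧ o < c2 ∧ c2 - o > 1))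
                  (PySem.List.pyRange j 0 (-1)) with
              | some c2 => (ms ++ [(o, c2)], c2 - 1, mn - 1)
              | none => (ms, j, mn)
            else (ms, j, mn)) = (ms ++ [(o, e)], e - 1, mn - 1)
          rw [if_pos ⟨hA1, hmn0⟩, pvScan cs j o hj hoodd, hfil]
          simp [hoe]
        have hBstep : pvStepB (pvEvens cs) (ms, k) o = (ms ++ [(o, e)], k + 1) := by
          show (if k < ((pvEvens cs).length : Int) ∧ o + 1 < PySem.List.pyGetD (pvEvens cs) k 0 then
              (ms ++ [(o, PySem.List.pyGetD (pvEvens cs) k 0)], k + 1) else (ms, k))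
            = (ms ++ [(o, e)], k + 1)
          rw [hgetE, if_pos ⟨by omega, hoe⟩]
        rw [List.foldl_cons, List.foldl_cons, hAstep, hBstep]
        apply ih
        · exact hmemos
        · omega
        · have hto : (k + 1).toNat = k.toNat + 1 := by omega
          rw [hto]
          have hdt : (pvEvens cs).drop (k.toNat + 1) = t := by
            rw [← List.drop_drop, hd]
            rfl
          rw [hdt]
          have h1 : (pvEvens cs).filter (fun x => decide (x ≤ e - 1)) =
              ((pvEvens cs).filter (fun x => decide (x ≤ j))).filter (fun x => decide (x ≤ e - 1)) := by
            rw [List.filter_filter]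
            apply List.filter_congr
            intro x _
            by_cases hx1 : x ≤ e - 1
            · simp only [hx1, decide_true, Bool.true_and]
              have : x ≤ j := by omega
              simp [this]
            · simp [hx1]
          have h2 : (pvEvens cs).filter (fun x => decide (x ≤ e - 1)) = t := by
            rw [h1, hfil, List.filter_cons, if_neg (by simp)]
            exact List.filter_eq_self.mpr (fun x hx => by
              have := hlt x hx
              simp only [decide_eq_true_eq]
              omega)
          exact h2.symm
        · omega
        · omega
        · simp only [List.length_cons] at hlen
          push_cast at hlen ⊢
          omega
      · have hAstep : pvStepA (pvEO cs) (ms, j, mn) o = (ms, j, mn) := by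
          show (if PySem.List.pyGetD (pvEO cs) o "" = "o" ∧ 0 < mn then
              match List.find?
                  (fun c2 => decide (PySem.List.pyGetD (pvEO cs) c2 "" = "e" ∧ o < c2 ∧ c2 - o > 1))
                  (PySem.List.pyRange j 0 (-1)) with
              | some c2 => (ms ++ [(o, c2)], c2 - 1, mn - 1)
              | none => (ms, j, mn)
            else (ms, j, mn)) = (ms, j, mn)
          rw [pvScan cs j o hj hoodd, hfil]
          simp [hoe]
        have hBstep : pvStepB (pvEvens cs) (ms, k) o = (ms, k) := by
          show (if k < ((pvEvens cs).length : Int) ∧ o + 1 < PySem.List.pyGetD (pvEvens cs) k 0 then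
              (ms ++ [(o, PySem.List.pyGetD (pvEvens cs) k 0)], k + 1) else (ms, k)) = (ms, k)
          rw [hgetE, if_neg (by rintro ⟨-, h⟩; exact hoe h)]
        rw [List.foldl_cons, List.foldl_cons, hAstep, hBstep]
        exact ih ms j k mn hmemos hk0 hinv hj hmn hlen' 

-- ===== VERDICT (by name: the statement is the Claim_ definition above) =====
theorem hp_matches_spec : Claim_equal_hp_matches := by
  intro input _
  show hp_matches input = hp_matches_alt input
  unfold hp_matches hp_matches_alt
  simp only [pvEO_of_enumerate, pvOdds_of_enumerate, pvEvens_of_enumerate]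
  have hlen : (pvEO ((PySem.Str.lower input).toList)).length = ((PySem.Str.lower input).toList).length := by
    unfold pvEO
    rw [List.length_map, PySem.List.length_pyRange_one]
    omega
  rw [hlen, count_o_pvEO, count_e_pvEO, foldA_odds]
  apply pvMain
  · exact fun o ho => ho
  · exact le_refl 0
  · show (pvEvens _).drop (0:Int).toNat = _
    rw [Int.toNat_zero, List.drop_zero]
    symm
    apply List.filter_eq_self.mpr
    intro e he
    obtain ⟨-, heN, -, -⟩ := (mem_pvEvens _ e).mp he
    simp only [decide_eq_true_eq]
    omega
  · omega
  · omega
  · simp
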